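-- pv_equiv track=rewrite | github.com/sameem7/CodingBat | sum2.py | sum2
-- ===== SOURCE A (Python) =====
-- def sum2(nums):
--
--   #function to add the 2 elements in the list
--   def sumList(nums, length):
--     result = 0
--     for i in range (length):
--       result = result + nums[i]
--
--     return result
--
--   #call the adding function with appropriate arguments depending on the length of the original list
--   if (len(nums) < 2):
--     return (sumList (nums, len(nums)))
--   else:
--     return (sumList(nums[0:2], 2)) #Slice the first 2 elements if list is of length >2
-- ===== SOURCE B (Python) =====
-- def sum2(nums):
--     if len(nums) < 2:
--         return nums[0] if nums else 0
--     return nums[0] + nums[1]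
-- ===== Notes on version B (the rewrite author's own statement) =====
-- stated objective: simpler
-- what changed: Replaced the inner helper with its accumulator loop over a slice by a direct closed-form branch: empty gives 0, one element is returned as-is, otherwise nums[0] + nums[1].
import Mathlib
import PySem

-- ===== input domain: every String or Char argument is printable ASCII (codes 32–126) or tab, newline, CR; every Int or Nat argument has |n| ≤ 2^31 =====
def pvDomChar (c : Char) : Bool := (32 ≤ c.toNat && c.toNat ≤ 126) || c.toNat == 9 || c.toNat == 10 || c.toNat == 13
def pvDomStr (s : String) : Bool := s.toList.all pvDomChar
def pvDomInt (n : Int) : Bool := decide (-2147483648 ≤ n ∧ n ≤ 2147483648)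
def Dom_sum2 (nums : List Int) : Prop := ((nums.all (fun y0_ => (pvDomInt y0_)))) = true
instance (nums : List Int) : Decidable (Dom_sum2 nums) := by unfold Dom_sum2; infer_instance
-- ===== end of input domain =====

-- B replaces A's inner accumulator-loop-over-a-slice helper by a closed-form branch (simpler; same O(1) cost).

-- ===== PORT A =====
-- inner helper sumList: result = 0; for i in range(length): result += nums[i]
-- (indexing via pyGet?; the loop only reaches in-range indices, so getD 0 is never the fallback)
def sumList (nums : List Int) (length : Int) : Int :=
  (PySem.List.pyRange 0 length 1).foldl
    (fun result i => result + (PySem.List.pyGet? nums i).getD 0) 0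

def sum2 (nums : List Int) : Int :=
  if (nums.length : Int) < 2 then sumList nums nums.length
  else sumList ((PySem.List.slice nums (some 0) (some 2))) 2

-- ===== PORT B =====
def sum2_alt (nums : List Int) : Int :=
  match nums with
  | [] => 0
  | [a] => a
  | a :: b :: _ => a + b

-- ===== PRECONDITION & SPEC =====
def Spec_sum2 (nums : List Int) (out : Int) : Prop := out = sum2_alt nums
instance (nums : List Int) (out : Int) : Decidable (Spec_sum2 nums out) := by unfold Spec_sum2; infer_instance

-- ===== CLAIM (what is proved, stated in full; the proofs are below) =====
def Claim_equal_sum2 : Prop := ∀ (nums : List Int), Dom_sum2 nums → Spec_sum2 nums (sum2 nums)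

-- ===== LEMMAS AND PROOFS =====

-- ===== VERDICT (by name: the statement is the Claim_ definition above) =====
theorem sum2_spec : Claim_equal_sum2 := by
  intro nums _
  unfold Spec_sum2 sum2 sum2_alt sumList
  match nums with
  | [] => decide
  | [a] =>
      simp [PySem.List.pyRange, PySem.List.pyGet?, PySem.List.pyIdx?]
  | a :: b :: rest =>
      have h : ¬ ((a :: b :: rest).length : Int) < 2 := by
        simp [List.length]
      rw [if_neg h]
      simp [PySem.List.slice, List.take, PySem.List.pyRange, List.range_succ, PySem.List.pyGet?, PySem.List.pyIdx?]
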